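-- pv_equiv track=rewrite | github.com/PortiaChung/lucky-cat | lucky_cat/common/utils/helper.py | isMonotonicIncApproximate
-- ===== SOURCE A (Python) =====
-- def isMonotonicIncApproximate(A):
--     # monotonically increase
--     iVio = False
--     iPass = True
--     for i in range(1, len(A)):
--         if A[i] < A[i - 1]:
--             if iVio:
--                 iPass = False
--                 break
--             else:
--                 # if last elem decreases, treat as violation
--                 if i == len(A) - 1:
--                     return False
--                 iVio = True
--
--     if iPass:
--         return True
--     return False
-- ===== SOURCE B (Python) =====
-- def isMonotonicIncApproximate(A):
--     # stage 1: locate the first descent; stages 2/3: decide on its position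
--     # and verify the remaining suffix is already in sorted order
--     n = len(A)
--     first = next((i for i in range(1, n) if A[i] < A[i - 1]), None)
--     if first is None:
--         return True
--     if first == n - 1:
--         return False
--     tail = A[first:]
--     return tail == sorted(tail)
-- ===== Notes on version B (the rewrite author's own statement) =====
-- stated objective: alternative
-- what changed: Replaces A's single-pass iVio/iPass state machine with a staged algorithm: find the first descent index, return True if none, False if it is the last index, and otherwise decide by comparing the remaining suffix with its sorted copy.
import Mathlib
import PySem

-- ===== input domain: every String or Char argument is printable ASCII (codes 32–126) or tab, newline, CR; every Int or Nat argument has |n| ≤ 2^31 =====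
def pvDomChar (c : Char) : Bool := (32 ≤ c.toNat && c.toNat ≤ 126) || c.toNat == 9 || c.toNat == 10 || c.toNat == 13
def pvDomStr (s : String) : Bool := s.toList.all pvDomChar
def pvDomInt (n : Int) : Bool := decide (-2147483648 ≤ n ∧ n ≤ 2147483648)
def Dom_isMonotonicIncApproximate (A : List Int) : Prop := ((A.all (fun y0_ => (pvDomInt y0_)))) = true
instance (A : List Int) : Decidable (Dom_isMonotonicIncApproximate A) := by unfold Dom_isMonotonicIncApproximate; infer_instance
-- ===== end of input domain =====

-- B replaces A's single-pass iVio/iPass state machine by a staged algorithm: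
-- find the first descent, decide on its position, and verify the suffix by
-- comparing it with its sorted copy ("alternative": different decomposition, not faster).

-- ===== PORT A =====
-- the for-loop with early returns: state iVio; `return False` / break-with-iPass=False both yield false
def goA (A : List Int) (i : Nat) (iVio : Bool) : Bool :=
  if h : i < A.length then
    if A.getD i 0 < A.getD (i - 1) 0 then
      if iVio then false
      else if i = A.length - 1 then false
      else goA A (i + 1) true
    else goA A (i + 1) iVio
  else true
termination_by A.length - i

def isMonotonicIncApproximate (A : List Int) : Bool := goA A 1 false

-- ===== PORT B =====
-- the next(generator, None): first index i ≥ start with A[i] < A[i-1]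
def findDesc (A : List Int) (i : Nat) : Option Nat :=
  if h : i < A.length then
    if A.getD i 0 < A.getD (i - 1) 0 then some i
    else findDesc A (i + 1)
  else none
termination_by A.length - i

def isMonotonicIncApproximate_alt (A : List Int) : Bool :=
  match findDesc A 1 with
  | none => true
  | some first =>
    if first = A.length - 1 then false
    else
      let tail := PySem.List.slice A (some (first : Int)) none
      decide (tail = PySem.List.sorted tail (fun x => x) false)

-- ===== PRECONDITION & SPEC =====
def Spec_isMonotonicIncApproximate (A : List Int) (out : Bool) : Prop := out = isMonotonicIncApproximate_alt A
instance (A : List Int) (out : Bool) : Decidable (Spec_isMonotonicIncApproximate A out) := by unfold Spec_isMonotonicIncApproximate; infer_instance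

-- ===== CLAIM (what is proved, stated in full; the proofs are below) =====
def Claim_equal_isMonotonicIncApproximate : Prop := ∀ (A : List Int), Dom_isMonotonicIncApproximate A → Spec_isMonotonicIncApproximate A (isMonotonicIncApproximate A)

-- ===== LEMMAS AND PROOFS =====

-- findDesc = none ↔ no descent from index i on
lemma findDesc_none_iff (A : List Int) : ∀ k i, A.length - i = k →
    (findDesc A i = none ↔ ∀ m, i ≤ m → m < A.length → A.getD (m - 1) 0 ≤ A.getD m 0) := by
  intro k
  induction k with
  | zero =>
      intro i hk
      rw [findDesc, dif_neg (by omega)]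
      constructor
      · intro _ m hm hmlt; omega
      · intro _; rfl
  | succ k ih =>
      intro i hk
      have h : i < A.length := by omega
      rw [findDesc, dif_pos h]
      by_cases hv : A.getD i 0 < A.getD (i - 1) 0
      · rw [if_pos hv]
        constructor
        · intro hc; cases hc
        · intro hall
          exact absurd (hall i le_rfl h) (by omega)
      · rw [if_neg hv, ih (i + 1) (by omega)]
        constructor
        · intro hall m hm hmlt
          rcases Nat.eq_or_lt_of_le hm with rfl | hlt
          · omega
          · exact hall m hlt hmlt
        · intro hall m hm hmlt
          exact hall m (by omega) hmlt

-- A's loop with iVio = true decides "no further descent"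
lemma goA_true_eq (A : List Int) : ∀ k i, A.length - i = k →
    goA A i true = decide (findDesc A i = none) := by
  intro k
  induction k with
  | zero =>
      intro i hk
      rw [goA, dif_neg (by omega), findDesc, dif_neg (by omega)]
      simp
  | succ k ih =>
      intro i hk
      have h : i < A.length := by omega
      rw [goA, dif_pos h, findDesc, dif_pos h]
      by_cases hv : A.getD i 0 < A.getD (i - 1) 0
      · rw [if_pos hv, if_pos hv]; simp
      · rw [if_neg hv, if_neg hv, ih (i + 1) (by omega)]

-- A's loop with iVio = false, phrased on the first descent
lemma goA_false_eq (A : List Int) : ∀ k i, A.length - i = k →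
    goA A i false =
      (match findDesc A i with
       | none => true
       | some j => if j = A.length - 1 then false else goA A (j + 1) true) := by
  intro k
  induction k with
  | zero =>
      intro i hk
      rw [goA, dif_neg (by omega), findDesc, dif_neg (by omega)]
  | succ k ih =>
      intro i hk
      have h : i < A.length := by omega
      rw [goA, dif_pos h, findDesc, dif_pos h]
      by_cases hv : A.getD i 0 < A.getD (i - 1) 0
      · rw [if_pos hv, if_pos hv]; simp
      · rw [if_neg hv, if_neg hv, ih (i + 1) (by omega)]

-- findDesc only returns in-range indices
lemma findDesc_lt (A : List Int) : ∀ k i j, A.length - i = k →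
    findDesc A i = some j → j < A.length := by
  intro k
  induction k with
  | zero =>
      intro i j hk h
      rw [findDesc, dif_neg (by omega)] at h
      cases h
  | succ k ih =>
      intro i j hk h
      have hi : i < A.length := by omega
      rw [findDesc, dif_pos hi] at h
      by_cases hv : A.getD i 0 < A.getD (i - 1) 0
      · rw [if_pos hv] at h; cases h; exact hi
      · rw [if_neg hv] at h; exact ih (i + 1) j (by omega) h

-- l == sorted(l) iff l is pairwise non-decreasing
lemma eq_sorted_iff_pairwise (l : List Int) :
    (l = PySem.List.sorted l (fun x => x) false) ↔ l.Pairwise (· ≤ ·) := by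
  constructor
  · intro h
    have := PySem.List.sorted_pairwise (xs := l) (key := fun x => x)
    rw [← h] at this
    exact this
  · intro h
    exact (PySem.List.sorted_eq_self_of_pairwise l (fun x => x) h).symm

-- the suffix is pairwise non-decreasing iff there is no descent past j
lemma pairwise_drop_iff (A : List Int) (j : Nat) (hj : j < A.length) :
    (A.drop j).Pairwise (· ≤ ·) ↔ findDesc A (j + 1) = none := by
  rw [findDesc_none_iff A (A.length - (j + 1)) (j + 1) rfl,
      ← List.isChain_iff_pairwise, List.isChain_iff_getElem]
  constructor
  · intro hc m hm hmlt
    have hm1 : 0 < m := by omega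
    have hidx : (m - 1) - j + 1 < (A.drop j).length := by
      simp [List.length_drop]; omega
    have := hc ((m - 1) - j) hidx
    simp only [List.getElem_drop] at this
    simp only [show j + (m - 1 - j) = m - 1 from by omega,
               show j + (m - 1 - j + 1) = m from by omega] at this
    rw [List.getD_eq_getElem _ _ (by omega), List.getD_eq_getElem _ _ hmlt]
    exact this
  · intro hall i hi
    simp only [List.getElem_drop]
    have hlt : j + i + 1 < A.length := by
      simp [List.length_drop] at hi; omega
    have := hall (j + i + 1) (by omega) hlt
    rw [List.getD_eq_getElem _ _ (by omega), List.getD_eq_getElem _ _ hlt] at this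
    simpa using this

-- ===== VERDICT (by name: the statement is the Claim_ definition above) =====
theorem isMonotonicIncApproximate_spec : Claim_equal_isMonotonicIncApproximate := by
  intro A _
  unfold Spec_isMonotonicIncApproximate isMonotonicIncApproximate isMonotonicIncApproximate_alt
  rw [goA_false_eq A (A.length - 1) 1 rfl]
  cases hfd : findDesc A 1 with
  | none => rfl
  | some j =>
      simp only []
      by_cases hlast : j = A.length - 1
      · rw [if_pos hlast, if_pos hlast]
      · rw [if_neg hlast, if_neg hlast]
        have hj : j < A.length := findDesc_lt A (A.length - 1) 1 j rfl hfd
        rw [goA_true_eq A (A.length - (j + 1)) (j + 1) rfl,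
            PySem.List.slice_from_natCast]
        rw [decide_eq_decide.mpr ((eq_sorted_iff_pairwise _).trans (pairwise_drop_iff A j hj))]
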